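-- pv_equiv track=rewrite | github.com/orlando-trejo/structures-algorithms-nanodegree | Exercises/sort_algorithms.py | case_sort
-- ===== SOURCE A (Python) =====
-- def case_sort(string):
--     """
--     Here are some pointers on how the function should work:
--     1. Sort the string
--     2. Create an empty output list
--     3. Iterate over original string
--         if the character is lower-case:
--             pick lower-case character from sorted string to place in output list
--         else:
--             pick upper-case character from sorted string to place in output list
--
--     Note: You can use Python's inbuilt ord() function to find the ASCII value of a character
--     """
--     # Sort string
--     sort_string = sorted(string)
--     index = 0
--     for letter in sort_string:
--         num = ord(letter)
--         if num >= 97: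
--             break
--         index += 1
--
--     lower = sort_string[index:]
--     upper = sort_string[:index]
--
--     # Create output
--     output = []
--
--     # Iterate over string
--     i_lower = 0
--     i_upper = 0
--     for char in string:
--         if ord(char) >= 97:
--             output.append(lower[i_lower])
--             i_lower += 1
--
--         else:
--             output.append(upper[i_upper])
--             i_upper += 1
--
--     return ''.join(output)
-- ===== SOURCE B (Python) =====
-- def case_sort(string):
--     # Counting sort over char codes: one pass to count, emit each code class
--     # in ascending order, then place by class of the original position.
--     counts = [0] * 128
--     for ch in string:
--         counts[ord(ch)] += 1
--     low = [chr(c) * counts[c] for c in range(97, 128)]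
--     up = [chr(c) * counts[c] for c in range(0, 97)]
--     low_it = iter(''.join(low))
--     up_it = iter(''.join(up))
--     return ''.join(next(low_it) if ord(ch) >= 97 else next(up_it) for ch in string)
-- ===== Notes on version B (the rewrite author's own statement) =====
-- stated objective: alternative
-- what changed: Replaces the comparison sort plus linear break-scan and slicing by a counting sort over the 128 ASCII codes, emitting the below-97 and 97-and-above character streams directly and consuming them through two iterators; intended as asymptotically lighter (O(n+128) vs O(n log n)) but a timing run did not consistently confirm a 1.5x speed-up, so no speed is claimed.
import Mathlib
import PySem

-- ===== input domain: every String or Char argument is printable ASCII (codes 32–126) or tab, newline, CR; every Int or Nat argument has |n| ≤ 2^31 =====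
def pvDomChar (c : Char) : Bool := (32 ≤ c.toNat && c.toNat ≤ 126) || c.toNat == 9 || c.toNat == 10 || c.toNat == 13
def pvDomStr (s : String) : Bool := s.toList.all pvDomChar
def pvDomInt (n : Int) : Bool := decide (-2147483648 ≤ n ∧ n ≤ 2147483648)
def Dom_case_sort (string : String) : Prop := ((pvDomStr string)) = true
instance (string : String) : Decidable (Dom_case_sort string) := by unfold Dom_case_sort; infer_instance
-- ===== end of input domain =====

-- B replaces A's comparison sort + break-scan + slicing + two index counters by a
-- counting sort over the 128 ASCII codes consumed through two iterators (objective: alternative).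

-- ===== PORT A =====
-- the `for letter in sort_string: … break` loop computing `index`
def caseSortBreak : List Char → Nat
  | [] => 0
  | c :: t => if 97 ≤ c.toNat then 0 else caseSortBreak t + 1

-- the placement loop: i_lower/i_upper index into the fixed lists `lower`/`upper`
-- (Python's lower[i_lower] can never be out of range, so the default is never used)
def caseSortPlaceA (lower upper : List Char) : List Char → Nat → Nat → List Char → List Char
  | [], _, _, out => out
  | c :: rest, il, iu, out =>
    if 97 ≤ c.toNat then
      caseSortPlaceA lower upper rest (il + 1) iu (out ++ [PySem.List.pyGetD lower (il : Int) 'A'])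
    else
      caseSortPlaceA lower upper rest il (iu + 1) (out ++ [PySem.List.pyGetD upper (iu : Int) 'A'])

def case_sort (string : String) : String :=
  let sort_string := PySem.List.sorted string.toList (fun c => c) false
  let index := caseSortBreak sort_string
  let lower := PySem.List.slice sort_string (some (index : Int)) none
  let upper := PySem.List.slice sort_string none (some (index : Int))
  String.ofList (caseSortPlaceA lower upper string.toList 0 0 [])

-- ===== PORT B =====
-- counts[ord(ch)] += 1 over a 128-entry table
def caseSortCounts (cs : List Char) : List Int :=
  cs.foldl (fun counts ch => counts.set ch.toNat (counts.getD ch.toNat 0 + 1)) (List.replicate 128 0)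

-- ''.join(chr(c) * counts[c] for c in range(lo, hi))
def caseSortExpand (counts : List Int) (lo hi : Int) : List Char :=
  ((PySem.List.pyRange lo hi 1).map
    (fun c => List.replicate (counts.getD c.toNat 0).toNat (Char.ofNat c.toNat))).flatten

-- the comprehension consuming the two iterators (next never exhausts them)
def caseSortPlaceB : List Char → List Char → List Char → List Char → List Char
  | [], _, _, out => out
  | c :: rest, low, up, out =>
    if 97 ≤ c.toNat then
      caseSortPlaceB rest low.tail up (out ++ [low.headD 'A'])
    else
      caseSortPlaceB rest low up.tail (out ++ [up.headD 'A'])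

def case_sort_alt (string : String) : String :=
  let counts := caseSortCounts string.toList
  let low := caseSortExpand counts 97 128
  let up := caseSortExpand counts 0 97
  String.ofList (caseSortPlaceB string.toList low up [])

-- ===== PRECONDITION & SPEC =====
def Spec_case_sort (string : String) (out : String) : Prop := out = case_sort_alt string
instance (string : String) (out : String) : Decidable (Spec_case_sort string out) := by unfold Spec_case_sort; infer_instance

-- ===== CLAIM (what is proved, stated in full; the proofs are below) =====
def Claim_equal_case_sort : Prop := ∀ (string : String), Dom_case_sort string → Spec_case_sort string (case_sort string)

-- ===== LEMMAS AND PROOFS =====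

theorem charToNat_ofNat (n : Nat) (h : n < 128) : (Char.ofNat n).toNat = n := by
  have hv : n.isValidChar := Or.inl (by omega)
  simp only [Char.ofNat, hv, dif_pos]
  simp [Char.toNat, Char.ofNatAux]

theorem charLe_iff (a b : Char) : a ≤ b ↔ a.toNat ≤ b.toNat := by
  rw [Char.le_def]; exact UInt32.le_iff_toNat_le

-- the two placement loops walk the same data: indexing into `lower` at i_lower is
-- taking the head of `lower.drop i_lower`
theorem place_equiv (cs : List Char) : ∀ (low up : List Char) (il iu : Nat) (out : List Char),
    caseSortPlaceA low up cs il iu out = caseSortPlaceB cs (low.drop il) (up.drop iu) out := by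
  induction cs with
  | nil => intro low up il iu out; rfl
  | cons c rest ih =>
    intro low up il iu out
    simp only [caseSortPlaceA, caseSortPlaceB]
    split
    · rw [ih low up (il + 1) iu, ← List.tail_drop]
      congr 2
      simp [PySem.List.pyGetD_natCast, List.head?_drop, List.getD]
    · rw [ih low up il (iu + 1), ← List.tail_drop]
      congr 2
      simp [PySem.List.pyGetD_natCast, List.head?_drop, List.getD]

-- A's break index splits the sorted list into the <97 prefix and the ≥97 suffix
theorem break_take (t : List Char) (hp : t.Pairwise (· ≤ ·)) :
    t.take (caseSortBreak t) = t.filter (fun c => decide (c.toNat < 97)) := by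
  induction t with
  | nil => rfl
  | cons c r ih =>
    rw [List.pairwise_cons] at hp
    by_cases h : 97 ≤ c.toNat
    · simp only [caseSortBreak, if_pos h, List.take_zero]
      have : ∀ x ∈ c :: r, ¬ (x.toNat < 97) := by
        intro x hx
        rw [List.mem_cons] at hx
        rcases hx with rfl | hx
        · omega
        · have := (charLe_iff c x).mp (hp.1 x hx); omega
      rw [List.filter_eq_nil_iff.mpr (by intro x hx; simpa using this x hx)]
    · simp only [caseSortBreak, if_neg h, List.take_succ_cons, List.filter_cons,
        decide_eq_true_eq, if_pos (by omega : c.toNat < 97)]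
      rw [ih hp.2]

theorem break_drop (t : List Char) (hp : t.Pairwise (· ≤ ·)) :
    t.drop (caseSortBreak t) = t.filter (fun c => decide (97 ≤ c.toNat)) := by
  induction t with
  | nil => rfl
  | cons c r ih =>
    rw [List.pairwise_cons] at hp
    by_cases h : 97 ≤ c.toNat
    · simp only [caseSortBreak, if_pos h, List.drop_zero]
      have : ∀ x ∈ c :: r, 97 ≤ x.toNat := by
        intro x hx
        rw [List.mem_cons] at hx
        rcases hx with rfl | hx
        · omega
        · have := (charLe_iff c x).mp (hp.1 x hx); omega
      exact (List.filter_eq_self.mpr (by intro x hx; simpa using this x hx)).symm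
    · simp only [caseSortBreak, List.drop_succ_cons, List.filter_cons,
        decide_eq_true_eq, if_neg h]
      exact ih hp.2

-- the counting table: entry k holds the number of chars of code k
theorem counts_getD (cs : List Char) : ∀ (l : List Int), l.length = 128 →
    (∀ c ∈ cs, c.toNat < 128) → ∀ k, k < 128 →
    (cs.foldl (fun counts ch => counts.set ch.toNat (counts.getD ch.toNat 0 + 1)) l).getD k 0
      = l.getD k 0 + (cs.countP (fun c => c.toNat == k) : Int) := by
  induction cs with
  | nil => intro l _ _ k _; simp
  | cons c rest ih =>
    intro l hl hc k hk
    simp only [List.foldl_cons]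
    rw [ih _ (by simp [hl]) (fun x hx => hc x (by simp [hx])) k hk]
    by_cases h : c.toNat = k
    · rw [List.countP_cons_of_pos (by simp [h])]
      subst h
      simp [List.getD, List.getElem?_set_self (by omega : c.toNat < l.length)]
      ring
    · rw [List.countP_cons_of_neg (by simp [h])]
      congr 1
      simp [List.getD, List.getElem?_set_ne h]

-- counting a char in the expansion of a strictly increasing code list
theorem expand_count (x : Char) (g : Int → Nat) : ∀ (ks : List Int),
    (∀ c ∈ ks, 0 ≤ c ∧ c < 128) → ks.Pairwise (· < ·) →
    List.count x ((ks.map (fun c => List.replicate (g c) (Char.ofNat c.toNat))).flatten)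
      = if (x.toNat : Int) ∈ ks then g (x.toNat : Int) else 0 := by
  intro ks
  induction ks with
  | nil => simp
  | cons c rest ih =>
    intro hb hp
    rw [List.pairwise_cons] at hp
    have hc := hb c (by simp)
    simp only [List.map_cons, List.flatten_cons, List.count_append]
    rw [ih (fun y hy => hb y (by simp [hy])) hp.2]
    by_cases h : (x.toNat : Int) = c
    · have hx : x = Char.ofNat c.toNat := by
        apply Char.ext; apply UInt32.toNat_inj.mp
        change x.toNat = (Char.ofNat c.toNat).toNat
        rw [charToNat_ofNat c.toNat (by omega)]; omega
      have hnr : (x.toNat : Int) ∉ rest := by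
        intro hmem
        have := hp.1 _ hmem; omega
      have h1 : List.count x (List.replicate (g c) (Char.ofNat c.toNat)) = g c := by
        rw [← hx, List.count_replicate_self]
      rw [h1, if_neg hnr, if_pos (List.mem_cons.mpr (Or.inl h)), ← h]
      omega
    · have hx : x ≠ Char.ofNat c.toNat := by
        intro he
        have : x.toNat = c.toNat := by rw [he, charToNat_ofNat c.toNat (by omega)]
        omega
      have h1 : List.count x (List.replicate (g c) (Char.ofNat c.toNat)) = 0 := by
        rw [List.count_eq_zero]
        intro hm
        exact hx (List.eq_of_mem_replicate hm)
      rw [h1]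
      by_cases hm : (x.toNat : Int) ∈ rest
      · rw [if_pos hm, if_pos (List.mem_cons.mpr (Or.inr hm))]
        omega
      · rw [if_neg hm, if_neg (by simp [List.mem_cons, h, hm])]

-- every element of the expansion has its code in the code list
theorem expand_mem (g : Int → Nat) (ks : List Int) (x : Char)
    (hx : x ∈ (ks.map (fun c => List.replicate (g c) (Char.ofNat c.toNat))).flatten) :
    ∃ c ∈ ks, x = Char.ofNat c.toNat := by
  rw [List.mem_flatten] at hx
  rcases hx with ⟨l, hl, hxl⟩
  rw [List.mem_map] at hl
  rcases hl with ⟨c, hc, rfl⟩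
  exact ⟨c, hc, List.eq_of_mem_replicate hxl⟩

-- the expansion is weakly increasing (codes increase across blocks)
theorem expand_pairwise (g : Int → Nat) : ∀ (ks : List Int),
    (∀ c ∈ ks, 0 ≤ c ∧ c < 128) → ks.Pairwise (· < ·) →
    ((ks.map (fun c => List.replicate (g c) (Char.ofNat c.toNat))).flatten).Pairwise (· ≤ ·) := by
  intro ks
  induction ks with
  | nil => simp
  | cons c rest ih =>
    intro hb hp
    rw [List.pairwise_cons] at hp
    have hc := hb c (by simp)
    simp only [List.map_cons, List.flatten_cons]
    rw [List.pairwise_append]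
    refine ⟨List.pairwise_replicate_of_refl, ih (fun y hy => hb y (by simp [hy])) hp.2, ?_⟩
    intro a ha b hbm
    have ha' := List.eq_of_mem_replicate ha
    rcases expand_mem g rest b hbm with ⟨c', hc', rfl⟩
    have hcc := hp.1 c' hc'
    have hc'' := hb c' (by simp [hc'])
    rw [ha', charLe_iff, charToNat_ofNat c.toNat (by omega), charToNat_ofNat c'.toNat (by omega)]
    omega

-- B's expansion equals the corresponding filter of the sorted list
theorem expand_eq_filter (s : List Char) (hdom : ∀ c ∈ s, c.toNat < 128)
    (lo hi : Int) (h0 : 0 ≤ lo) (hhi : hi ≤ 128) (hlh : lo ≤ hi) :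
    caseSortExpand (caseSortCounts s) lo hi
      = (PySem.List.sorted s (fun c => c) false).filter
          (fun c => decide (lo ≤ (c.toNat : Int) ∧ (c.toNat : Int) < hi)) := by
  have hbound : ∀ c ∈ PySem.List.pyRange lo hi 1, 0 ≤ c ∧ c < 128 := by
    intro c hc
    rw [PySem.List.mem_pyRange_one] at hc
    omega
  have hstrict := PySem.List.pairwise_lt_pyRange_one (a := lo) (b := hi)
  apply List.Perm.eq_of_pairwise (fun a b _ _ hab hba => le_antisymm hab hba)
      (expand_pairwise _ _ hbound hstrict)
      (List.Pairwise.filter _ (PySem.List.sorted_pairwise (xs := s) (key := fun c => c)))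
  · rw [List.perm_iff_count]
    intro x
    rw [expand_count x _ _ hbound hstrict]
    have hcf : ∀ (t : List Char), List.count x (t.filter (fun c => decide (lo ≤ (c.toNat : Int) ∧ (c.toNat : Int) < hi)))
        = if lo ≤ (x.toNat : Int) ∧ (x.toNat : Int) < hi then List.count x t else 0 := by
      intro t
      by_cases hx : lo ≤ (x.toNat : Int) ∧ (x.toNat : Int) < hi
      · rw [if_pos hx, List.count_filter (by simpa using hx)]
      · rw [if_neg hx, List.count_eq_zero]
        intro hmem
        rw [List.mem_filter] at hmem
        exact hx (by simpa using hmem.2)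
    rw [hcf]
    by_cases hx : lo ≤ (x.toNat : Int) ∧ (x.toNat : Int) < hi
    · rw [if_pos (PySem.List.mem_pyRange_one.mpr hx), if_pos hx]
      have hx128 : x.toNat < 128 := by omega
      have := counts_getD s (List.replicate 128 0) (by simp) hdom x.toNat hx128
      unfold caseSortCounts
      have hround : ((x.toNat : Int)).toNat = x.toNat := by omega
      rw [hround, this, List.getD_replicate (0 : Int) (by omega)]
      have : s.countP (fun c => c.toNat == x.toNat) = List.count x s := by
        apply List.countP_congr
        intro c _
        constructor
        · intro hcx
          have : c.toNat = x.toNat := by simpa using hcx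
          have : c = x := Char.ext (UInt32.toNat_inj.mp this)
          simp [this]
        · intro hcx
          have : c = x := by simpa using hcx
          simp [this]
      rw [this]
      have := (PySem.List.sorted_perm s (fun c => c) false).count_eq x
      omega
    · rw [if_neg (fun hm => hx (PySem.List.mem_pyRange_one.mp hm)), if_neg hx]

-- ===== VERDICT (by name: the statement is the Claim_ definition above) =====
theorem case_sort_spec : Claim_equal_case_sort := by
  intro string hdom
  show case_sort string = case_sort_alt string
  have hA : case_sort string = String.ofList (caseSortPlaceA
      (PySem.List.slice (PySem.List.sorted string.toList (fun c => c) false)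
        (some ((caseSortBreak (PySem.List.sorted string.toList (fun c => c) false) : Nat) : Int)) none)
      (PySem.List.slice (PySem.List.sorted string.toList (fun c => c) false)
        none (some ((caseSortBreak (PySem.List.sorted string.toList (fun c => c) false) : Nat) : Int)))
      string.toList 0 0 []) := rfl
  have hB : case_sort_alt string = String.ofList (caseSortPlaceB string.toList
      (caseSortExpand (caseSortCounts string.toList) 97 128)
      (caseSortExpand (caseSortCounts string.toList) 0 97) []) := rfl
  rw [hA, hB]
  have hdom' : ∀ c ∈ string.toList, c.toNat < 128 := by
    intro c hc
    unfold Dom_case_sort pvDomStr at hdom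
    rw [List.all_eq_true] at hdom
    have := hdom c hc
    unfold pvDomChar at this
    simp only [Bool.or_eq_true, Bool.and_eq_true, decide_eq_true_eq, beq_iff_eq] at this
    omega
  have hsp : (PySem.List.sorted string.toList (fun c => c) false).Pairwise (· ≤ ·) :=
    PySem.List.sorted_pairwise (xs := string.toList) (key := fun c => c)
  rw [place_equiv, List.drop_zero, List.drop_zero]
  have hlow : PySem.List.slice (PySem.List.sorted string.toList (fun c => c) false)
      (some ((caseSortBreak (PySem.List.sorted string.toList (fun c => c) false) : Nat) : Int)) none
      = caseSortExpand (caseSortCounts string.toList) 97 128 := by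
    rw [PySem.List.slice_from_natCast, break_drop _ hsp,
      expand_eq_filter string.toList hdom' 97 128 (by omega) (by omega) (by omega)]
    apply List.filter_congr
    intro c hc
    have h128 : c.toNat < 128 := hdom' c ((PySem.List.mem_sorted _ _ _ _).mp hc)
    simp only [decide_eq_decide]
    omega
  have hup : PySem.List.slice (PySem.List.sorted string.toList (fun c => c) false)
      none (some ((caseSortBreak (PySem.List.sorted string.toList (fun c => c) false) : Nat) : Int))
      = caseSortExpand (caseSortCounts string.toList) 0 97 := by
    rw [PySem.List.slice_to_natCast, break_take _ hsp,
      expand_eq_filter string.toList hdom' 0 97 (by omega) (by omega) (by omega)]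
    apply List.filter_congr
    intro c _
    simp only [decide_eq_decide]
    omega
  rw [hlow, hup]
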